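-- pv_equiv track=rewrite | github.com/RDNordic/ai-championship-warroom | submissions/grocerybot-ko-version/src/grocerybot/strategies/medium_v2.py | _multiset_combinations
-- ===== SOURCE A (Python) =====
-- from itertools import combinations, product
--
-- def _multiset_combinations(items: list[str], k: int) -> set[tuple[str, ...]]:
--     if k <= 0:
--         return {()}
--     if k > len(items):
--         return set()
--     combos: set[tuple[str, ...]] = set()
--     for idxs in combinations(range(len(items)), k):
--         combos.add(tuple(sorted(items[i] for i in idxs)))
--     return combos
-- ===== SOURCE B (Python) =====
-- def _multiset_combinations(items: list[str], k: int) -> set[tuple[str, ...]]: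
--     # DP over suffixes: distinct sorted k-combinations, memoised on (start index, k).
--     if k <= 0:
--         return {()}
--     n = len(items)
--     memo: dict[tuple[int, int], list[tuple[str, ...]]] = {}
--
--     def rec(i: int, m: int) -> list[tuple[str, ...]]:
--         if m == 0:
--             return [()]
--         if i == n:
--             return []
--         key = (i, m)
--         if key in memo:
--             return memo[key]
--         with_i = [tuple(sorted((items[i],) + t)) for t in rec(i + 1, m - 1)]
--         seen = set(with_i)
--         res = with_i + [t for t in rec(i + 1, m) if t not in seen]
--         memo[key] = res
--         return res
--
--     return set(rec(0, k))
-- ===== Notes on version B (the rewrite author's own statement) =====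
-- stated objective: alternative
-- what changed: A enumerates all C(n,k) index combinations and deduplicates their sorted tuples through one set; B is a memoised recursion over suffixes that merges already-deduplicated per-suffix result lists, so each distinct combination is produced once per subproblem instead of once per realizing index tuple (much faster on duplicate-heavy inputs, but a timing run's random near-distinct inputs could not confirm a 1.5x speedup, so no speed claim).
import Mathlib
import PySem

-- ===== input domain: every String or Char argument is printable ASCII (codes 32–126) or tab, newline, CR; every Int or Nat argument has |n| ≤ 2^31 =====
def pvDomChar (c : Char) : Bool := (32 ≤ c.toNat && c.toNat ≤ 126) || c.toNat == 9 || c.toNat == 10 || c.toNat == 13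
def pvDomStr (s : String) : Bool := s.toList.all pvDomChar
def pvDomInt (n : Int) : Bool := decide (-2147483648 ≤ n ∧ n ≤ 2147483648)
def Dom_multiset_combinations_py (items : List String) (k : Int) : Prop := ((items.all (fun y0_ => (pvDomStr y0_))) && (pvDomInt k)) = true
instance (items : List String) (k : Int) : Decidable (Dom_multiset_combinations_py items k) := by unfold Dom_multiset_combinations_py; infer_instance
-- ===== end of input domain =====

-- B replaces A's enumerate-all-index-combinations-then-dedup by a memoised suffix
-- recursion that merges already-deduplicated results, producing each distinct
-- combination once per subproblem instead of once per realizing index tuple (objective: alternative).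

-- ===== PORT A =====
def multiset_combinations_py (items : List String) (k : Int) : List (List String) :=
  if k ≤ 0 then [[]]
  else if k > (items.length : Int) then []
  else
    (PySem.List.combinations (PySem.List.pyRange 0 (items.length : Int) 1) k.toNat).foldl
      (fun combos idxs =>
        PySem.Set.add combos
          (PySem.List.sorted (idxs.map (fun i => PySem.List.pyGetD items i "")) (fun s => s) false))
      []

-- ===== PORT B =====
-- rec(i, m) of Source B, ported as structural recursion on the suffix items[i:]
-- (the memo table is a pure caching device and is dropped in the port).
def pvAltRec : List String → Nat → List (List String)
  | _, 0 => [[]]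
  | [], _ + 1 => []
  | x :: xs, m + 1 =>
    let withX := (pvAltRec xs m).map (fun t => PySem.List.sorted (x :: t) (fun s => s) false)
    let seen : PySem.Set (List String) := PySem.Set.ofList withX
    withX ++ (pvAltRec xs (m + 1)).filter (fun t => !(PySem.Set.contains seen t))

def multiset_combinations_py_alt (items : List String) (k : Int) : List (List String) :=
  if k ≤ 0 then [[]]
  else PySem.Set.ofList (pvAltRec items k.toNat)

-- ===== PRECONDITION & SPEC =====
def Spec_multiset_combinations_py (items : List String) (k : Int) (out : List (List String)) : Prop := out = multiset_combinations_py_alt items k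
instance (items : List String) (k : Int) (out : List (List String)) : Decidable (Spec_multiset_combinations_py items k out) := by unfold Spec_multiset_combinations_py; infer_instance

-- ===== CLAIM (what is proved, stated in full; the proofs are below) =====
def Claim_equal_multiset_combinations_py : Prop := ∀ (items : List String) (k : Int), Dom_multiset_combinations_py items k → Spec_multiset_combinations_py items k (multiset_combinations_py items k)

-- ===== LEMMAS AND PROOFS =====

-- `sorted(c)` with the identity key, and insertion of one element, as used by both ports.
def pvSortId (c : List String) : List String := PySem.List.sorted c (fun s => s) false

def pvIns (x : String) (t : List String) : List String := PySem.List.sorted (x :: t) (fun s => s) false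

theorem pvSortId_cons (x : String) (c : List String) :
    pvSortId (x :: c) = pvIns x (pvSortId c) := by
  unfold pvSortId pvIns
  exact PySem.List.sorted_eq_sorted_of_perm _ _ _ (fun a b h => h)
    ((PySem.List.sorted_perm c (fun s => s) false).cons x).symm

theorem pvSortId_pairwise (c : List String) : (pvSortId c).Pairwise (· ≤ ·) := by
  simpa [pvSortId] using PySem.List.sorted_pairwise c (fun s => s)

theorem pvIns_inj (x : String) {t₁ t₂ : List String}
    (h₁ : t₁.Pairwise (· ≤ ·)) (h₂ : t₂.Pairwise (· ≤ ·))
    (h : pvIns x t₁ = pvIns x t₂) : t₁ = t₂ := by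
  have hp : (x :: t₁).Perm (x :: t₂) := by
    have p₁ := PySem.List.sorted_perm (x :: t₁) (fun s => s) false
    have p₂ := PySem.List.sorted_perm (x :: t₂) (fun s => s) false
    unfold pvIns at h
    exact p₁.symm.trans (h ▸ p₂)
  exact PySem.List.eq_of_perm_of_pairwise_le_of_injective (fun s => s)
    (fun a b hab => hab) hp.cons_inv h₁ h₂

theorem pvContains_iff {α : Type} [BEq α] [LawfulBEq α] (s : List α) (x : α) :
    PySem.Set.contains s x = true ↔ x ∈ s := by
  simp [PySem.Set.contains]

theorem pvNotContains {α : Type} [BEq α] [LawfulBEq α] (s : List α) (t : α) :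
    (!(PySem.Set.contains s t)) = decide (t ∉ s) := by
  by_cases h : t ∈ s <;> simp [h]

theorem pvContains_ofList {α : Type} [BEq α] [LawfulBEq α] (s : List α) (x : α) :
    PySem.Set.contains (PySem.Set.ofList s) x = PySem.Set.contains s x := by
  by_cases h : x ∈ s
  · rw [(pvContains_iff _ _).2 ((PySem.Set.mem_ofList s x).2 h), (pvContains_iff _ _).2 h]
  · have h' : ¬ x ∈ PySem.Set.ofList s := fun hx => h ((PySem.Set.mem_ofList s x).1 hx)
    rw [Bool.eq_false_iff.2 (fun hx => h' ((pvContains_iff _ _).1 hx)),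
        Bool.eq_false_iff.2 (fun hx => h ((pvContains_iff _ _).1 hx))]

theorem pvFoldl_add_eq {α : Type} [BEq α] [LawfulBEq α] :
    ∀ (B s : List α),
      List.foldl PySem.Set.add s B
        = s ++ (PySem.List.dedup B).filter (fun t => !(PySem.Set.contains s t)) := by
  intro B
  induction B with
  | nil => intro s; simp [PySem.List.dedup, PySem.Set.ofList]
  | cons b B' ih =>
    intro s
    have hded : PySem.List.dedup (b :: B')
        = [b] ++ (PySem.List.dedup B').filter (fun t => !(PySem.Set.contains [b] t)) := by
      have : PySem.List.dedup (b :: B') = List.foldl PySem.Set.add [b] B' := by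
        rw [PySem.List.dedup_eq_ofList, PySem.Set.ofList_eq_foldl]; rfl
      rw [this, ih]
    rw [List.foldl_cons, ih, hded]
    simp only [pvNotContains]
    by_cases hb : b ∈ s
    · have hadd : PySem.Set.add s b = s := by
        unfold PySem.Set.add; rw [if_pos ((pvContains_iff s b).2 hb)]
      rw [hadd, List.filter_append, List.filter_filter]
      have h1 : List.filter (fun t => decide (t ∉ s)) [b] = [] := by simp [hb]
      rw [h1, List.nil_append]
      congr 1
      apply List.filter_congr
      intro t _
      by_cases htb : t = b
      · subst htb; simp [hb]
      · simp [htb]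
    · have hadd : PySem.Set.add s b = s ++ [b] := by
        unfold PySem.Set.add
        rw [if_neg (by simp [hb])]
      rw [hadd, List.filter_append, List.filter_filter]
      have h1 : List.filter (fun t => decide (t ∉ s)) [b] = [b] := by simp [hb]
      rw [h1, List.append_assoc]
      congr 1
      simp only [List.singleton_append, List.cons.injEq, true_and]
      apply List.filter_congr
      intro t _
      by_cases htb : t = b
      · subst htb; simp
      · simp [htb, List.mem_append]

theorem pvDedup_cons {α : Type} [BEq α] [LawfulBEq α] (b : α) (l : List α) :
    PySem.List.dedup (b :: l)
      = b :: (PySem.List.dedup l).filter (fun t => !(t == b)) := by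
  have : PySem.List.dedup (b :: l) = List.foldl PySem.Set.add [b] l := by
    rw [PySem.List.dedup_eq_ofList, PySem.Set.ofList_eq_foldl]; rfl
  rw [this, pvFoldl_add_eq]
  simp only [List.singleton_append, List.cons.injEq, true_and]
  apply List.filter_congr
  intro t _
  simp [PySem.Set.contains]

theorem pvDedup_append {α : Type} [BEq α] [LawfulBEq α] (A B : List α) :
    PySem.List.dedup (A ++ B)
      = PySem.List.dedup A
        ++ (PySem.List.dedup B).filter
            (fun t => !(PySem.Set.contains (PySem.List.dedup A) t)) := by
  rw [PySem.List.dedup_eq_ofList, PySem.Set.ofList_eq_foldl, List.foldl_append,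
      ← PySem.Set.ofList_eq_foldl, ← PySem.List.dedup_eq_ofList, pvFoldl_add_eq]

theorem pvDedup_map_inj {α β : Type} [BEq α] [LawfulBEq α] [BEq β] [LawfulBEq β]
    (g : α → β) : ∀ (L : List α),
    (∀ a ∈ L, ∀ b ∈ L, g a = g b → a = b) →
    PySem.List.dedup (L.map g) = (PySem.List.dedup L).map g := by
  intro L
  induction L with
  | nil => intro _; rfl
  | cons a l ih =>
    intro hinj
    rw [List.map_cons, pvDedup_cons, pvDedup_cons, List.map_cons,
        ih (fun u hu v hv h => hinj u (List.mem_cons_of_mem a hu) v (List.mem_cons_of_mem a hv) h),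
        List.filter_map]
    congr 1
    congr 1
    apply List.filter_congr
    intro t ht
    have htl : t ∈ l := (PySem.List.mem_dedup l t).1 ht
    by_cases hta : t = a
    · subst hta; simp
    · have : g t ≠ g a := fun h =>
        hta (hinj t (List.mem_cons_of_mem a htl) a List.mem_cons_self h)
      simp [Function.comp, hta, this]

theorem pvAltRec_key : ∀ (l : List String) (m : Nat),
    PySem.List.dedup ((PySem.List.combinations l m).map pvSortId) = pvAltRec l m := by
  intro l
  induction l with
  | nil =>
    intro m
    cases m with
    | zero => rfl
    | succ m' => rfl
  | cons x xs ih =>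
    intro m
    cases m with
    | zero => rfl
    | succ m' =>
      rw [PySem.List.combinations_cons_succ, List.map_append]
      have hmap : (List.map (fun c => x :: c) (PySem.List.combinations xs m')).map pvSortId
          = ((PySem.List.combinations xs m').map pvSortId).map (pvIns x) := by
        rw [List.map_map, List.map_map]
        exact List.map_congr_left (fun c _ => pvSortId_cons x c)
      rw [hmap, pvDedup_append]
      have hinj : ∀ a ∈ (PySem.List.combinations xs m').map pvSortId,
          ∀ b ∈ (PySem.List.combinations xs m').map pvSortId, pvIns x a = pvIns x b → a = b := by
        intro a ha b hb h
        obtain ⟨ca, _, rfl⟩ := List.mem_map.1 ha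
        obtain ⟨cb, _, rfl⟩ := List.mem_map.1 hb
        exact pvIns_inj x (pvSortId_pairwise ca) (pvSortId_pairwise cb) h
      rw [pvDedup_map_inj (pvIns x) _ hinj, ih m', ih (m' + 1)]
      have hrhs : pvAltRec (x :: xs) (m' + 1)
          = List.map (pvIns x) (pvAltRec xs m')
            ++ (pvAltRec xs (m' + 1)).filter
                (fun t => !(PySem.Set.contains
                    (PySem.Set.ofList (List.map (pvIns x) (pvAltRec xs m'))) t)) := rfl
      rw [hrhs]
      simp only [pvContains_ofList]

theorem pvAltRec_nodup (l : List String) (m : Nat) : (pvAltRec l m).Nodup := by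
  rw [← pvAltRec_key, PySem.List.dedup_eq_ofList]
  exact PySem.Set.nodup_ofList _

-- ===== VERDICT (by name: the statement is the Claim_ definition above) =====
theorem multiset_combinations_py_spec : Claim_equal_multiset_combinations_py := by
  intro items k _
  unfold Spec_multiset_combinations_py multiset_combinations_py multiset_combinations_py_alt
  by_cases hk : k ≤ 0
  · simp [hk]
  · rw [if_neg hk, if_neg hk]
    rw [PySem.Set.ofList_eq_self_of_nodup _ (pvAltRec_nodup items k.toNat)]
    by_cases hlen : k > (items.length : Int)
    · rw [if_pos hlen, ← pvAltRec_key]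
      have : items.length < k.toNat := by omega
      rw [show PySem.List.combinations items k.toNat = ([] : List (List String)) from
            PySem.List.combinations_eq_nil_of_length_lt (xs := items) this]
      rfl
    · rw [if_neg hlen, ← pvAltRec_key, PySem.List.dedup_eq_ofList, PySem.Set.ofList_eq_foldl,
          ← List.foldl_map]
      have hget : (PySem.List.pyRange 0 (items.length : Int) 1).map
          (fun i => PySem.List.pyGetD items i "") = items := by
        simpa [PySem.List.len] using PySem.List.map_pyGetD_pyRange_zero items ""
      have hcomb : PySem.List.combinations items k.toNat
          = (PySem.List.combinations (PySem.List.pyRange 0 (items.length : Int) 1) k.toNat).map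
              (List.map (fun i => PySem.List.pyGetD items i "")) := by
        rw [← PySem.List.combinations_map, hget]
      rw [hcomb, List.map_map]
      rfl
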